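-- pv_equiv track=rewrite | github.com/xRuiAlves/FEUP-IART | proj2/src/Solution.py | penaltyConsecutiveEvents
-- ===== SOURCE A (Python) =====
-- def penaltyConsecutiveEvents(events_per_timeslot_per_day):
--     penalty = 0
--     for events_in_day in events_per_timeslot_per_day:
--         day_consecutive_count = 0
--         for is_attending in events_in_day:
--             if is_attending:
--                 day_consecutive_count += 1
--                 if (day_consecutive_count >= 3):
--                     penalty += 1
--             else:
--                 day_consecutive_count = 0
--     return penalty
-- ===== SOURCE B (Python) =====
-- def penaltyConsecutiveEvents(events_per_timeslot_per_day):
--     # Sliding-window view: the penalty equals the number of length-3 windows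
--     # of consecutive attended slots in each day.
--     penalty = 0
--     for day in events_per_timeslot_per_day:
--         penalty += sum(1 for a, b, c in zip(day, day[1:], day[2:]) if a and b and c)
--     return penalty
-- ===== Notes on version B (the rewrite author's own statement) =====
-- stated objective: alternative
-- what changed: Replaces the running-counter-with-threshold inner loop by counting length-3 all-true sliding windows via zip over the day and its two shifts.
import Mathlib
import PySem

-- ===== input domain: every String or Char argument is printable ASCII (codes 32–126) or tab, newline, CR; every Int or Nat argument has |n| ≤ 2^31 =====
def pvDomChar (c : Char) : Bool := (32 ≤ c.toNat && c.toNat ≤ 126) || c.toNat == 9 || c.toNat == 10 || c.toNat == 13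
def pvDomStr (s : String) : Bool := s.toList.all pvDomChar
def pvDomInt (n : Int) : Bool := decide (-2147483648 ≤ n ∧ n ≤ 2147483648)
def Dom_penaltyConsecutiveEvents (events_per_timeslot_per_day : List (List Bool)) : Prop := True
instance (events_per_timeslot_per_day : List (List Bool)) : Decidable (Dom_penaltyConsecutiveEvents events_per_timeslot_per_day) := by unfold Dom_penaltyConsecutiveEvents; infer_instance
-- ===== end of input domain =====

-- B counts length-3 all-true sliding windows per day instead of A's running counter with threshold (objective: alternative decomposition, same cost).

-- ===== PORT A =====
-- inner loop state: (day_consecutive_count, penalty)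
def penaltyConsecutiveEvents (events_per_timeslot_per_day : List (List Bool)) : Int :=
  events_per_timeslot_per_day.foldl
    (fun penalty events_in_day =>
      (events_in_day.foldl
        (fun (st : Int × Int) is_attending =>
          if is_attending then
            (st.1 + 1, if st.1 + 1 ≥ 3 then st.2 + 1 else st.2)
          else
            (0, st.2))
        (0, penalty)).2)
    0

-- ===== PORT B =====
-- day[1:] / day[2:] on a list with nonnegative literal index = List.drop (exact here)
def penaltyConsecutiveEvents_alt (events_per_timeslot_per_day : List (List Bool)) : Int :=
  events_per_timeslot_per_day.foldl
    (fun penalty day =>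
      penalty +
        ((((day.zip (day.drop 1)).zip (day.drop 2)).countP
            (fun x => x.1.1 && x.1.2 && x.2) : Nat) : Int))
    0

-- ===== PRECONDITION & SPEC =====
def Spec_penaltyConsecutiveEvents (events_per_timeslot_per_day : List (List Bool)) (out : Int) : Prop := out = penaltyConsecutiveEvents_alt events_per_timeslot_per_day
instance (events_per_timeslot_per_day : List (List Bool)) (out : Int) : Decidable (Spec_penaltyConsecutiveEvents events_per_timeslot_per_day out) := by unfold Spec_penaltyConsecutiveEvents; infer_instance

-- ===== CLAIM (what is proved, stated in full; the proofs are below) =====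
def Claim_equal_penaltyConsecutiveEvents : Prop := ∀ (events_per_timeslot_per_day : List (List Bool)), Dom_penaltyConsecutiveEvents events_per_timeslot_per_day → Spec_penaltyConsecutiveEvents events_per_timeslot_per_day (penaltyConsecutiveEvents events_per_timeslot_per_day)

-- ===== LEMMAS AND PROOFS =====

-- B's per-day count, named for the proofs (definitionally the countP in the B port)
def countTriples (day : List Bool) : Int :=
  (((day.zip (day.drop 1)).zip (day.drop 2)).countP (fun x => x.1.1 && x.1.2 && x.2) : Nat)

-- A's per-day contribution, recursively, with the counter saturated at 2
def countT : List Bool → Nat → Int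
  | [], _ => 0
  | b :: t, k => if b then (if k = 2 then 1 else 0) + countT t (min (k + 1) 2) else countT t 0

theorem foldA_eq_countT (day : List Bool) :
    ∀ (c : Nat) (p : Int),
      (day.foldl
        (fun (st : Int × Int) is_attending =>
          if is_attending then
            (st.1 + 1, if st.1 + 1 ≥ 3 then st.2 + 1 else st.2)
          else
            (0, st.2))
        ((c : Int), p)).2 = p + countT day (min c 2) := by
  induction day with
  | nil => intro c p; simp [countT]
  | cons b t ih =>
    intro c p
    cases b with
    | false =>
      simpa [countT] using ih 0 p
    | true =>
      have h1 : ((c : Int) + 1) = ((c + 1 : Nat) : Int) := by push_cast; ring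
      have h2 : min (c + 1) 2 = min (min c 2 + 1) 2 := by omega
      simp only [List.foldl_cons, if_pos, countT]
      rw [h1, ih (c + 1), ← h2]
      by_cases h3 : (2 : Nat) ≤ c
      · rw [if_pos (show (((c + 1 : Nat) : Int) ≥ 3) by push_cast; omega),
          if_pos (by omega : min c 2 = 2)]
        ring
      · rw [if_neg (show ¬ (((c + 1 : Nat) : Int) ≥ 3) by push_cast; omega),
          if_neg (by omega : ¬ min c 2 = 2)]
        ring

-- peel the head window off countTriples
theorem countTriples_cons (a : Bool) (t : List Bool) :
    countTriples (a :: t) =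
      (if a && t.getD 0 false && t.getD 1 false then 1 else 0) + countTriples t := by
  match t with
  | [] => simp [countTriples]
  | [x] => simp [countTriples]
  | x :: y :: r => simp [countTriples]; cases a <;> cases x <;> cases y <;> simp <;> push_cast <;> ring

theorem countTriples_eq_countT (l : List Bool) :
    ∀ k : Nat, k ≤ 2 → countTriples (List.replicate k true ++ l) = countT l k := by
  induction l with
  | nil =>
    intro k hk
    interval_cases k <;> simp [countTriples, countT, List.replicate]
  | cons b t ih =>
    intro k hk
    have ih0 : countTriples t = countT t 0 := by simpa using ih 0 (by omega)
    have ih1 : countTriples (true :: t) = countT t 1 := by simpa using ih 1 (by omega)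
    have ih2 : countTriples (true :: true :: t) = countT t 2 := by simpa using ih 2 (by omega)
    interval_cases k <;> cases b
    · -- k = 0, b = false
      show countTriples (false :: t) = countT (false :: t) 0
      rw [countTriples_cons]
      simp [countT, ih0]
    · -- k = 0, b = true
      simpa [countT] using ih1
    · -- k = 1, b = false
      rw [show List.replicate 1 true ++ false :: t = true :: false :: t by rfl,
        countTriples_cons, countTriples_cons]
      simp [countT, ih0]
    · -- k = 1, b = true
      simpa [countT] using ih2
    · -- k = 2, b = false
      rw [show List.replicate 2 true ++ false :: t = true :: true :: false :: t by rfl,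
        countTriples_cons, countTriples_cons, countTriples_cons]
      simp [countT, ih0]
    · -- k = 2, b = true
      rw [show List.replicate 2 true ++ true :: t = true :: true :: true :: t by rfl,
        countTriples_cons]
      simp [countT, ih2]

theorem dayA_eq_dayB (day : List Bool) (p : Int) :
    (day.foldl
      (fun (st : Int × Int) is_attending =>
        if is_attending then
          (st.1 + 1, if st.1 + 1 ≥ 3 then st.2 + 1 else st.2)
        else
          (0, st.2))
      (0, p)).2 = p + countTriples day := by
  have h := foldA_eq_countT day 0 p
  have h2 : countTriples day = countT day 0 := by
    simpa using countTriples_eq_countT day 0 (by omega)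
  simpa [h2] using h

-- ===== VERDICT (by name: the statement is the Claim_ definition above) =====
theorem penaltyConsecutiveEvents_spec : Claim_equal_penaltyConsecutiveEvents := by
  intro l _
  unfold Spec_penaltyConsecutiveEvents penaltyConsecutiveEvents penaltyConsecutiveEvents_alt
  simp only [dayA_eq_dayB, countTriples]
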